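-- pv_equiv track=rewrite | github.com/vadimstasiev/Python_buffalo_libmicon | libmicon.py | calc_check_byte
-- ===== SOURCE A (Python) =====
-- def calc_check_byte(bytes):
-- 	checkbyte = 0x00
-- 	for byte in bytes:
-- 		checkbyte += byte
-- 		checkbyte %= 256
-- 	checkbyte^=0xFF
-- 	checkbyte+=0x01
-- 	checkbyte%=256
-- 	return checkbyte
-- ===== SOURCE B (Python) =====
-- def calc_check_byte(bytes):
--     # Divide-and-conquer: sum mod 256 by recursive halving, then two's-complement negate.
--     def s(chunk):
--         if not chunk:
--             return 0
--         if len(chunk) == 1: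
--             return chunk[0] % 256
--         mid = len(chunk) // 2
--         return (s(chunk[:mid]) + s(chunk[mid:])) % 256
--     return (256 - s(bytes)) % 256
-- ===== Notes on version B (the rewrite author's own statement) =====
-- stated objective: alternative
-- what changed: Replaces A's left-to-right accumulate-and-mod loop plus XOR-0xFF-and-add-1 bit trick by a divide-and-conquer recursion that halves the list, combines the two partial sums mod 256, and finally negates modularly as (256 - s) % 256 (valid because addition mod 256 is associative/commutative, so any combination order yields the same sum).
import Mathlib
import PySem

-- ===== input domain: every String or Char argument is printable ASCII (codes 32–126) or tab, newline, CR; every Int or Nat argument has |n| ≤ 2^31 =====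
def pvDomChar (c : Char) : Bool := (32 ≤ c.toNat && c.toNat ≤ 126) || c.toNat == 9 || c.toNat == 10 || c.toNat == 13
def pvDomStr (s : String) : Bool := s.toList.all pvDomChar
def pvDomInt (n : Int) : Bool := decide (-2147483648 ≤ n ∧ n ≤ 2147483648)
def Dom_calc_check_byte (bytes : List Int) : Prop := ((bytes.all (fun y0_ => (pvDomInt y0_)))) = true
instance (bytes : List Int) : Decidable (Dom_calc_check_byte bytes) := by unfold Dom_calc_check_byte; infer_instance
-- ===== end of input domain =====

-- B replaces A's left-to-right accumulate-and-mod loop and XOR/increment bit trick by a divide-and-conquer halving recursion combined mod 256, finished by modular negation (objective: alternative).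


-- ===== PORT A =====
def calc_check_byte (bytes : List Int) : Int :=
  let checkbyte : Int := 0x00
  let checkbyte := bytes.foldl (fun checkbyte byte => PySem.Int.mod (checkbyte + byte) 256) checkbyte
  let checkbyte := PySem.Int.bxor checkbyte 0xFF
  let checkbyte := checkbyte + 0x01
  let checkbyte := PySem.Int.mod checkbyte 256
  checkbyte

-- ===== PORT B =====
-- helper s: sum of the chunk mod 256 by recursive halving; chunk[:mid]/chunk[mid:]
-- with 0 ≤ mid ≤ len are exactly List.take mid / List.drop mid.
def ccbSum : List Int → Int
  | [] => 0
  | [b] => PySem.Int.mod b 256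
  | x :: y :: t =>
    let mid := (x :: y :: t).length / 2
    PySem.Int.mod (ccbSum ((x :: y :: t).take mid) + ccbSum ((x :: y :: t).drop mid)) 256
termination_by l => l.length
decreasing_by
  all_goals simp [List.length_take, List.length_drop]; omega

def calc_check_byte_alt (bytes : List Int) : Int :=
  PySem.Int.mod (256 - ccbSum bytes) 256

-- ===== PRECONDITION & SPEC =====
def Spec_calc_check_byte (bytes : List Int) (out : Int) : Prop := out = calc_check_byte_alt bytes
instance (bytes : List Int) (out : Int) : Decidable (Spec_calc_check_byte bytes out) := by unfold Spec_calc_check_byte; infer_instance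

-- ===== CLAIM (what is proved, stated in full; the proofs are below) =====
def Claim_equal_calc_check_byte : Prop := ∀ (bytes : List Int), Dom_calc_check_byte bytes → Spec_calc_check_byte bytes (calc_check_byte bytes)

-- ===== LEMMAS AND PROOFS =====

theorem ccbSum_eq (l : List Int) : ccbSum l = l.sum % 256 := by
  induction l using ccbSum.induct with
  | case1 => simp [ccbSum]
  | case2 b =>
    rw [ccbSum, PySem.Int.mod_eq_emod_of_pos (by norm_num : (0:Int) < 256)]; simp
  | case3 x y t mid ih1 ih2 =>
    rw [ccbSum, PySem.Int.mod_eq_emod_of_pos (by norm_num : (0:Int) < 256)]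
    rw [ih1, ih2, ← Int.add_emod, ← List.sum_append, List.take_append_drop]

theorem ccb_loop (l : List Int) (c : Int) :
    l.foldl (fun checkbyte byte => (checkbyte + byte) % 256) (c % 256)
      = (c + l.sum) % 256 := by
  induction l generalizing c with
  | nil => simp
  | cons b t ih =>
    simp only [List.foldl_cons, List.sum_cons]
    rw [ih (c % 256 + b)]
    omega

set_option maxRecDepth 8192 in
theorem nat_xor_255 (m : Fin 256) : m.val ^^^ 255 = 255 - m.val := by revert m; decide

theorem ccb_xor (x : Int) (h0 : 0 ≤ x) (h1 : x < 256) : PySem.Int.bxor x 255 = 255 - x := by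
  obtain ⟨m, rfl⟩ := Int.eq_ofNat_of_zero_le h0
  have hm : m < 256 := by exact_mod_cast h1
  have hx : m ^^^ 255 = 255 - m := nat_xor_255 ⟨m, hm⟩
  rw [show (255:Int) = ((255:Nat):Int) by norm_num, PySem.Int.bxor_natCast, hx]
  push_cast [Nat.le_of_lt_succ hm]
  ring

-- ===== VERDICT (by name: the statement is the Claim_ definition above) =====
theorem calc_check_byte_spec : Claim_equal_calc_check_byte := by
  intro bytes _
  show calc_check_byte bytes = calc_check_byte_alt bytes
  unfold calc_check_byte calc_check_byte_alt
  have hf : (fun (checkbyte byte : Int) => PySem.Int.mod (checkbyte + byte) 256)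
      = (fun checkbyte byte => (checkbyte + byte) % 256) := by
    funext c b; exact PySem.Int.mod_eq_emod_of_pos (by norm_num)
  have hl := ccb_loop bytes 0
  norm_num at hl
  simp only [hf, hl]
  rw [ccb_xor _ (Int.emod_nonneg _ (by norm_num)) (Int.emod_lt_of_pos _ (by norm_num))]
  rw [PySem.Int.mod_eq_emod_of_pos (by norm_num), PySem.Int.mod_eq_emod_of_pos (by norm_num),
    ccbSum_eq]
  omega
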